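-- pv_equiv track=rewrite | github.com/KiFoundation/ki-simulator | election/src/validatorSelector.py | controled_sample
-- ===== SOURCE A (Python) =====
-- def controled_sample(validators_id_, num_validators_for_same_wallet, num_validators_all, operator_id_, stake=0):
--     # Validators for the same wallet :
--     validators_for_same_wallet = []
--     # Validators other :
--     validators_for_others = []
--
--     # Alter the validator distribution
--     count = 0
--     count_all = 0
--
--     for validator in validators_id_:
--         if count_all < num_validators_all - num_validators_for_same_wallet and validator[0] != operator_id_:
--             validators_for_others.append(validator)
--             count_all += 1
--         if count < num_validators_for_same_wallet and validator[0] == operator_id_: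
--             validators_for_same_wallet.append(validator)
--             count += 1
--
--     validators_id_altered = validators_for_same_wallet + validators_for_others
--
--     return validators_id_altered
-- ===== SOURCE B (Python) =====
-- def controled_sample(validators_id_, num_validators_for_same_wallet, num_validators_all, operator_id_, stake=0):
--     # Stable sort by group key: same-wallet validators form a leading block, others follow,
--     # each block keeping the original order; then slice each block to its cap.
--     ranked = sorted(validators_id_, key=lambda v: v[0] != operator_id_)
--     m = sum(1 for v in validators_id_ if v[0] == operator_id_)
--     cap_same = min(max(0, num_validators_for_same_wallet), m)
--     cap_others = max(0, num_validators_all - num_validators_for_same_wallet)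
--     return ranked[:cap_same] + ranked[m:m + cap_others]
-- ===== Notes on version B (the rewrite author's own statement) =====
-- stated objective: alternative
-- what changed: Replaces A's single interleaved loop with two counters and two accumulators by a stable sort on the boolean group key (same-wallet block first, original order kept within blocks) followed by slicing each block to its clamped cap.
import Mathlib
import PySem

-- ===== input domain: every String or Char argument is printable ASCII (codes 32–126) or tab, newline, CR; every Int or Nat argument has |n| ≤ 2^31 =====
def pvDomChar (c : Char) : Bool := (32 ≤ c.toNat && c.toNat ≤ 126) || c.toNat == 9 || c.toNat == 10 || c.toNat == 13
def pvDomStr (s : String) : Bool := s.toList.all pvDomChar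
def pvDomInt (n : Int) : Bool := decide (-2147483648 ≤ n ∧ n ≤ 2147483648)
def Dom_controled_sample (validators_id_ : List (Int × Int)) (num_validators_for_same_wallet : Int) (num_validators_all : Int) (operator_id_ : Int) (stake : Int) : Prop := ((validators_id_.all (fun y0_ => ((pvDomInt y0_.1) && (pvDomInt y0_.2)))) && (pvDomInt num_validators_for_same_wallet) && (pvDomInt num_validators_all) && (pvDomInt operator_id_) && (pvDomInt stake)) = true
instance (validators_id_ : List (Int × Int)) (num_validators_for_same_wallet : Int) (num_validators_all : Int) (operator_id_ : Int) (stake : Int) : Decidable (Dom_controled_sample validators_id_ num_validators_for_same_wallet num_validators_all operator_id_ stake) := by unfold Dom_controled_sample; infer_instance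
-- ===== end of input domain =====

-- B replaces A's interleaved counter loop by a stable sort on the boolean group key followed by two slices (objective: alternative; return value only — neither side mutates its input).


-- ===== PORT A =====
-- A's for-loop: state (validators_for_same_wallet, validators_for_others, count, count_all)
def csLoop (op nS nA : Int) :
    List (Int × Int) → List (Int × Int) → List (Int × Int) → Int → Int →
    List (Int × Int) × List (Int × Int)
  | [], s, o, _, _ => (s, o)
  | v :: rest, s, o, c, ca =>
    let (o', ca') := if ca < nA - nS ∧ v.1 ≠ op then (o ++ [v], ca + 1) else (o, ca)
    let (s', c') := if c < nS ∧ v.1 = op then (s ++ [v], c + 1) else (s, c)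
    csLoop op nS nA rest s' o' c' ca'

def controled_sample (validators_id_ : List (Int × Int)) (num_validators_for_same_wallet : Int) (num_validators_all : Int) (operator_id_ : Int) (stake : Int) : List (Int × Int) :=
  let (s, o) := csLoop operator_id_ num_validators_for_same_wallet num_validators_all validators_id_ [] [] 0 0
  s ++ o

-- ===== PORT B =====
-- B: stable sort by the boolean group key (same-wallet block first), then slice each block to its cap.
def controled_sample_alt (validators_id_ : List (Int × Int)) (num_validators_for_same_wallet : Int) (num_validators_all : Int) (operator_id_ : Int) (stake : Int) : List (Int × Int) :=
  let ranked := PySem.List.sorted validators_id_ (fun v => v.1 != operator_id_) false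
  let m : Int := (validators_id_.map (fun v => if v.1 == operator_id_ then (1 : Int) else 0)).sum
  let capSame := min (max 0 num_validators_for_same_wallet) m
  let capOthers := max 0 (num_validators_all - num_validators_for_same_wallet)
  PySem.List.slice ranked none (some capSame) ++ PySem.List.slice ranked (some m) (some (m + capOthers))

-- ===== PRECONDITION & SPEC =====
def Spec_controled_sample (validators_id_ : List (Int × Int)) (num_validators_for_same_wallet : Int) (num_validators_all : Int) (operator_id_ : Int) (stake : Int) (out : List (Int × Int)) : Prop := out = controled_sample_alt validators_id_ num_validators_for_same_wallet num_validators_all operator_id_ stake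
instance (validators_id_ : List (Int × Int)) (num_validators_for_same_wallet : Int) (num_validators_all : Int) (operator_id_ : Int) (stake : Int) (out : List (Int × Int)) : Decidable (Spec_controled_sample validators_id_ num_validators_for_same_wallet num_validators_all operator_id_ stake out) := by unfold Spec_controled_sample; infer_instance

-- ===== CLAIM (what is proved, stated in full; the proofs are below) =====
def Claim_equal_controled_sample : Prop := ∀ (validators_id_ : List (Int × Int)) (num_validators_for_same_wallet : Int) (num_validators_all : Int) (operator_id_ : Int) (stake : Int), Dom_controled_sample validators_id_ num_validators_for_same_wallet num_validators_all operator_id_ stake → Spec_controled_sample validators_id_ num_validators_for_same_wallet num_validators_all operator_id_ stake (controled_sample validators_id_ num_validators_for_same_wallet num_validators_all operator_id_ stake)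

-- ===== LEMMAS AND PROOFS =====

-- A-side loop invariant: remaining capacities determine the result as filter-then-take.
lemma csLoop_eq (op nS nA : Int) (xs : List (Int × Int)) :
    ∀ (s o : List (Int × Int)) (c ca : Int),
    csLoop op nS nA xs s o c ca =
      (s ++ (xs.filter (fun v => v.1 == op)).take (nS - c).toNat,
       o ++ (xs.filter (fun v => v.1 != op)).take (nA - nS - ca).toNat) := by
  induction xs with
  | nil => intro s o c ca; simp [csLoop]
  | cons v rest ih =>
    intro s o c ca
    by_cases hv : v.1 = op
    · by_cases hc : c < nS
      · have h1 : (nS - c).toNat = (nS - (c + 1)).toNat + 1 := by omega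
        simp [csLoop, hv, hc, ih, h1]
      · have h1 : (nS - c).toNat = 0 := by omega
        simp [csLoop, hv, hc, ih, h1]
    · by_cases hca : ca < nA - nS
      · have h1 : (nA - nS - ca).toNat = (nA - nS - (ca + 1)).toNat + 1 := by omega
        simp [csLoop, hv, hca, ih, h1]
      · have h1 : (nA - nS - ca).toNat = 0 := by omega
        simp [csLoop, hv, hca, ih, h1]

-- Unfolding equation for insertBy on a cons (definitional).
lemma insertBy_cons {α : Type} (before : α → α → Bool) (x y : α) (ys : List α) :
    PySem.List.insertBy before x (y :: ys) = if before x y then x :: y :: ys else y :: PySem.List.insertBy before x ys := rfl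

-- B-side: inserting a key-false element into (false-block ++ true-block) lands at the seam.
lemma insertBy_seam (op : Int) (x : Int × Int) (hx : x.1 = op) :
    ∀ (s o : List (Int × Int)), (∀ v ∈ s, v.1 = op) → (∀ v ∈ o, v.1 ≠ op) →
    PySem.List.insertBy (fun a b => decide (((a.1 != op) : Bool) < ((b.1 != op) : Bool))) x (s ++ o)
      = s ++ x :: o := by
  intro s
  induction s with
  | nil =>
    intro o _ ho
    cases o with
    | nil => simp [PySem.List.insertBy]
    | cons y ys =>
      have hy : y.1 ≠ op := ho y (by simp)
      have hb : (decide (((x.1 != op) : Bool) < ((y.1 != op) : Bool))) = true := by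
        simp [hx, hy, Bool.lt_iff]
      simp [insertBy_cons, hb]
  | cons a s' ih =>
    intro o hs ho
    have ha : a.1 = op := hs a (by simp)
    have hb : (decide (((x.1 != op) : Bool) < ((a.1 != op) : Bool))) = false := by
      simp [hx, ha]
    have hrec := ih o (fun v hv => hs v (by simp [hv])) ho
    rw [List.cons_append, insertBy_cons, hb]
    simp only [Bool.false_eq_true, if_false, hrec, List.cons_append]

-- B-side: inserting a key-true element never goes before anything, so it is appended.
lemma insertBy_last (op : Int) (x : Int × Int) (hx : x.1 ≠ op) (l : List (Int × Int)) :
    PySem.List.insertBy (fun a b => decide (((a.1 != op) : Bool) < ((b.1 != op) : Bool))) x l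
      = l ++ [x] := by
  apply PySem.List.insertBy_of_forall_not_before
  intro y _
  simp [hx, Bool.lt_iff]

-- The insertion-sort fold over a two-valued key keeps a partitioned accumulator.
lemma foldl_insertBy_partition (op : Int) (xs : List (Int × Int)) :
    ∀ (s o : List (Int × Int)), (∀ v ∈ s, v.1 = op) → (∀ v ∈ o, v.1 ≠ op) →
    xs.foldl (fun acc x => PySem.List.insertBy (fun a b => decide (((a.1 != op) : Bool) < ((b.1 != op) : Bool))) x acc) (s ++ o)
      = (s ++ xs.filter (fun v => v.1 == op)) ++ (o ++ xs.filter (fun v => v.1 != op)) := by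
  induction xs with
  | nil => intro s o _ _; simp
  | cons x rest ih =>
    intro s o hs ho
    by_cases hx : x.1 = op
    · have h1 := insertBy_seam op x hx s o hs ho
      have h2 := ih (s ++ [x]) o
        (by intro v hv; rcases List.mem_append.mp hv with h | h
            · exact hs v h
            · simpa [List.mem_singleton.mp h] using hx) ho
      simp only [List.foldl_cons, h1]
      have : s ++ x :: o = (s ++ [x]) ++ o := by simp
      rw [this, h2]
      simp [hx]
    · have h1 := insertBy_last op x hx (s ++ o)
      have h2 := ih s (o ++ [x]) hs
        (by intro v hv; rcases List.mem_append.mp hv with h | h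
            · exact ho v h
            · simpa [List.mem_singleton.mp h] using hx)
      simp only [List.foldl_cons, h1]
      have : (s ++ o) ++ [x] = s ++ (o ++ [x]) := by simp
      rw [this, h2]
      simp [hx]

-- Stable sort by the boolean key IS the partition: matches first, others after, orders kept.
lemma sorted_partition (op : Int) (xs : List (Int × Int)) :
    PySem.List.sorted xs (fun v => ((v.1 != op) : Bool)) false
      = xs.filter (fun v => v.1 == op) ++ xs.filter (fun v => v.1 != op) := by
  rw [PySem.List.sorted_eq_foldl_insertBy]
  simpa using foldl_insertBy_partition op xs [] [] (by simp) (by simp)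

-- ===== VERDICT (by name: the statement is the Claim_ definition above) =====
theorem controled_sample_spec : Claim_equal_controled_sample := by
  intro vs nS nA op stake _
  unfold Spec_controled_sample controled_sample controled_sample_alt
  rw [csLoop_eq, sorted_partition]
  set F0 := vs.filter (fun v => v.1 == op) with hF0
  set F1 := vs.filter (fun v => v.1 != op) with hF1
  have hm : (vs.map (fun v => if v.1 == op then (1 : Int) else 0)).sum = (F0.length : Int) := by
    rw [PySem.List.sum_map_ite_one_zero]
    simp [hF0, List.countP_eq_length_filter]
  simp only [hm]
  have hcap1 : (0 : Int) ≤ min (max 0 nS) (F0.length : Int) := by omega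
  rw [PySem.List.slice_to _ hcap1]
  have hb : (F0.length : Int) + max 0 (nA - nS) = ((F0.length + (max 0 (nA - nS)).toNat : Nat) : Int) := by
    push_cast; omega
  rw [hb, PySem.List.slice_natCast]
  simp only [List.nil_append]
  congr 1
  · -- first block: take of the leading filter
    by_cases h : nS.toNat ≤ F0.length
    · have h1 : (min (max 0 nS) (F0.length : Int)).toNat = nS.toNat := by omega
      rw [h1, List.take_append_of_le_length h]
      congr 1; omega
    · have h1 : (min (max 0 nS) (F0.length : Int)).toNat = F0.length := by omega
      rw [h1, List.take_append_of_le_length (le_refl _), List.take_length,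
          List.take_of_length_le (by omega)]
  · -- second block: drop past the leading filter, then take the cap
    rw [List.drop_append_of_le_length (le_refl _), List.drop_length]
    simp only [List.nil_append]
    congr 1; omega
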